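-- pv_equiv track=rewrite | github.com/cirosantilli/project-euler-solutions | solvers/947.py | _fib_pair
-- ===== SOURCE A (Python) =====
-- def _fib_pair(n: int, mod: int):
--     """Return (F_n, F_{n+1}) modulo mod using fast doubling (iterative)."""
--     a, b = 0, 1
--     # Process bits from MSB to LSB
--     for i in range(n.bit_length() - 1, -1, -1):
--         # Doubling formulas
--         two_b_minus_a = (2 * b - a) % mod
--         c = (a * two_b_minus_a) % mod  # F_{2k}
--         d = (a * a + b * b) % mod  # F_{2k+1}
--         if (n >> i) & 1:
--             a, b = d, (c + d) % mod
--         else: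
--             a, b = c, d
--     return a, b
-- ===== SOURCE B (Python) =====
-- def _fib_pair(n: int, mod: int):
--     """Return (F_n, F_{n+1}) modulo mod using recursive fast doubling."""
--     def fib(k):
--         if k == 0:
--             return (0, 1)
--         a, b = fib(k >> 1)
--         c = (a * ((2 * b - a) % mod)) % mod
--         d = (a * a + b * b) % mod
--         if k & 1:
--             return (d, (c + d) % mod)
--         return (c, d)
--     return fib(n)
-- ===== Notes on version B (the rewrite author's own statement) =====
-- stated objective: alternative
-- what changed: Replaces A's iterative MSB-to-LSB scan over bit positions (explicit bit_length/range loop with shift-and-mask bit tests) by recursive fast doubling that halves n at each call, the same doubling recurrence in a divide-and-conquer shape.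
-- outside the precondition, e.g. on _fib_pair(-5, 100): A returns (2, 3), B raises RecursionError; on _fib_pair(3, 0): A raises ZeroDivisionError, B raises ZeroDivisionError
import Mathlib
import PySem

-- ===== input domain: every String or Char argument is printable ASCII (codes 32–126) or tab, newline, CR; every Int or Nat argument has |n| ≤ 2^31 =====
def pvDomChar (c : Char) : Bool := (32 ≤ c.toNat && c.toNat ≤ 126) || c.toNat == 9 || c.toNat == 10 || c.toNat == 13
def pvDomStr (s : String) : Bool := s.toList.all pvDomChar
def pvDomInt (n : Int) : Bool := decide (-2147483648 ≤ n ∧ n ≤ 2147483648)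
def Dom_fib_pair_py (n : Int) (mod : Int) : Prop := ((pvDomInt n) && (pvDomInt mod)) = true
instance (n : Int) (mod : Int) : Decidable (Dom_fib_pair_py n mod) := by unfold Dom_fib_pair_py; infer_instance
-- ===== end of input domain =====

-- B replaces A's iterative MSB-to-LSB bit loop by recursive fast doubling (halving n each call); alternative decomposition, same cost.

-- ===== PORT A =====
-- loop body of A's `for i in range(n.bit_length()-1, -1, -1)` (i ≥ 0 throughout, so `n >> i` is `n >>> i.toNat`, exact)
def fibStepA (n : Int) (mod : Int) (st : Int × Int) (i : Int) : Int × Int :=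
  let a := st.1
  let b := st.2
  let two_b_minus_a := PySem.Int.mod (2 * b - a) mod
  let c := PySem.Int.mod (a * two_b_minus_a) mod
  let d := PySem.Int.mod (a * a + b * b) mod
  if PySem.Int.band (n >>> i.toNat) 1 ≠ 0 then (d, PySem.Int.mod (c + d) mod)
  else (c, d)

def fib_pair_py (n : Int) (mod : Int) : Int × Int :=
  (PySem.List.pyRange ((PySem.Int.bitLength n : Int) - 1) (-1) (-1)).foldl (fibStepA n mod) (0, 1)

-- ===== PORT B =====
-- Source B's inner recursive `fib(k)`; the recursion argument is a Nat because Python's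
-- recursion returns only for k ≥ 0 (Pre_ restricts to 0 ≤ n), where it is exact.
def fibAltRec (mod : Int) (k : Nat) : Int × Int :=
  if _h : k = 0 then (0, 1)
  else
    let p := fibAltRec mod (k >>> 1)
    let a := p.1
    let b := p.2
    let c := PySem.Int.mod (a * (PySem.Int.mod (2 * b - a) mod)) mod
    let d := PySem.Int.mod (a * a + b * b) mod
    if k &&& 1 ≠ 0 then (d, PySem.Int.mod (c + d) mod)
    else (c, d)
decreasing_by
  simpa [Nat.shiftRight_one] using Nat.div_lt_self (Nat.pos_of_ne_zero _h) one_lt_two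

def fib_pair_py_alt (n : Int) (mod : Int) : Int × Int :=
  fibAltRec mod n.toNat

-- ===== PRECONDITION & SPEC =====
-- Pre_ excludes n < 0, where A's two's-complement bit scan returns an accidental value while
-- B's natural recursion never terminates (RecursionError), and mod = 0 with n ≠ 0, where both
-- programs raise ZeroDivisionError.
def Pre_fib_pair_py (n : Int) (mod : Int) : Prop := 0 ≤ n ∧ (mod ≠ 0 ∨ n = 0)
instance (n : Int) (mod : Int) : Decidable (Pre_fib_pair_py n mod) := by unfold Pre_fib_pair_py; infer_instance
def pvWitness_fib_pair_py : Int × Int := (10, 1000)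

def Spec_fib_pair_py (n : Int) (mod : Int) (out : Int × Int) : Prop := out = fib_pair_py_alt n mod
instance (n : Int) (mod : Int) (out : Int × Int) : Decidable (Spec_fib_pair_py n mod out) := by unfold Spec_fib_pair_py; infer_instance

-- ===== CLAIM (what is proved, stated in full; the proofs are below) =====
def Claim_equal_fib_pair_py : Prop := ∀ (n : Int) (mod : Int), Dom_fib_pair_py n mod → Pre_fib_pair_py n mod → Spec_fib_pair_py n mod (fib_pair_py n mod)

-- ===== LEMMAS AND PROOFS =====

-- one loop iteration of A at bit index i is one unfolding of B's recursion
lemma step_eq (mod : Int) (m i : Nat) (h : m >>> i ≠ 0) :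
    fibStepA (m : Int) mod (fibAltRec mod (m >>> (i + 1))) (i : Int) = fibAltRec mod (m >>> i) := by
  conv_rhs => rw [fibAltRec]
  rw [dif_neg h]
  have hsh : m >>> i >>> 1 = m >>> (i + 1) := by
    rw [Nat.shiftRight_add]
  have hcast : ((m : Int) >>> ((i : Int)).toNat) = ((m >>> i : Nat) : Int) := by
    rw [Int.toNat_natCast, Int.natCast_shiftRight]
  simp only [fibStepA, hsh, hcast]
  have hband : PySem.Int.band ((m >>> i : Nat) : Int) 1 = (((m >>> i) &&& 1 : Nat) : Int) := by
    exact_mod_cast PySem.Int.band_natCast (m >>> i) 1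
  simp only [hband, ne_eq, Nat.cast_eq_zero]

-- loop invariant: folding A's body over [k, k-1, …, 0] starting from B's value at m >>> (k+1) yields B's value at m
lemma loop_inv (mod : Int) (m : Nat) :
    ∀ k : Nat, 2 ^ k ≤ m →
      (PySem.List.pyRange (k : Int) (-1) (-1)).foldl (fibStepA (m : Int) mod) (fibAltRec mod (m >>> (k + 1))) = fibAltRec mod m := by
  intro k
  induction k with
  | zero =>
    intro h
    have hm : m ≠ 0 := by omega
    rw [PySem.List.pyRange_neg_one_cons (by norm_num)]
    rw [show ((0 : Nat) : Int) - 1 = -1 by norm_num]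
    rw [PySem.List.pyRange_neg_one_eq_nil (le_refl _)]
    rw [List.foldl_cons, List.foldl_nil]
    have := step_eq mod m 0 (by simpa [Nat.shiftRight_zero] using hm)
    simpa [Nat.shiftRight_zero] using this
  | succ k ih =>
    intro h
    have hk : 2 ^ k ≤ m := le_trans (Nat.pow_le_pow_right (by norm_num) (Nat.le_succ k)) h
    have hne : m >>> (k + 1) ≠ 0 := by
      rw [Nat.shiftRight_eq_div_pow]
      exact Nat.ne_of_gt (Nat.div_pos h (Nat.pow_pos (by norm_num)))
    rw [show ((k + 1 : Nat) : Int) = (k : Int) + 1 by push_cast; ring]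
    rw [PySem.List.pyRange_neg_one_cons (by omega)]
    rw [show ((k : Int) + 1 - 1) = (k : Int) by ring]
    rw [List.foldl_cons]
    have hstep := step_eq mod m (k + 1) hne
    rw [show ((k + 1 : Nat) : Int) = (k : Int) + 1 by push_cast; ring] at hstep
    rw [show k + 1 + 1 = k + 2 from rfl] at hstep
    rw [hstep]
    exact ih hk

-- ===== VERDICT (by name: the statement is the Claim_ definition above) =====
theorem fib_pair_py_spec : Claim_equal_fib_pair_py := by
  intro n mod _ hpre
  rcases hpre with ⟨hn, _⟩
  show fib_pair_py n mod = fib_pair_py_alt n mod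
  by_cases h0 : n = 0
  · subst h0
    rw [fib_pair_py, fib_pair_py_alt]
    rw [show ((PySem.Int.bitLength 0 : Nat) : Int) - 1 = -1 by decide]
    rw [PySem.List.pyRange_neg_one_eq_nil (le_refl _), List.foldl_nil]
    rw [show (0 : Int).toNat = 0 from rfl, fibAltRec]
    rfl
  · set m : Nat := n.toNat with hm
    have hnm : (m : Int) = n := Int.toNat_of_nonneg hn
    have habs : n.natAbs = m := by omega
    have hmpos : m ≠ 0 := by omega
    set bl : Nat := PySem.Int.bitLength n with hbl
    have hlt : m < 2 ^ bl := by
      have h1 := PySem.Int.lt_two_pow_bitLength n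
      rw [habs, ← hbl] at h1
      exact h1
    have hbl1 : 1 ≤ bl := by
      by_contra hc
      interval_cases bl
      · simp at hlt; omega
    have hle : 2 ^ (bl - 1) ≤ m := by
      have h1 := PySem.Int.two_pow_bitLength_le n h0
      rw [habs, ← hbl] at h1
      exact h1
    have hsh0 : m >>> (bl - 1 + 1) = 0 := by
      rw [Nat.sub_add_cancel hbl1, Nat.shiftRight_eq_div_pow]
      exact Nat.div_eq_of_lt hlt
    have h := loop_inv mod m (bl - 1) hle
    rw [hsh0] at h
    rw [show fibAltRec mod 0 = (0, 1) by rw [fibAltRec]; rfl] at h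
    rw [hnm] at h
    rw [fib_pair_py, fib_pair_py_alt, ← hbl, ← hm]
    rw [show ((bl : Nat) : Int) - 1 = ((bl - 1 : Nat) : Int) by rw [Nat.cast_sub hbl1]; push_cast; ring]
    exact h
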